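-- pv_equiv track=rewrite | github.com/wpytlewski-gd/PYTHON-BASIC | practice/1_python_part_1/task4.py | calculate_power_with_difference
-- ===== SOURCE A (Python) =====
-- from typing import List
--
-- def calculate_power_with_difference(ints: List[int]) -> List[int]:
--     results_list = []
--     prev_substract = 0
--     for current_int in ints:
--         current_power = current_int**2
--         results_list.append(current_power - prev_substract)
--         prev_substract = current_power - current_int
--     return results_list
-- ===== SOURCE B (Python) =====
-- from typing import List
--
-- def calculate_power_with_difference(ints: List[int]) -> List[int]:
--     if not ints:
--         return []
--     return [ints[0] ** 2] + [c * c - p * p + p for p, c in zip(ints, ints[1:])]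
-- ===== Notes on version B (the rewrite author's own statement) =====
-- stated objective: alternative
-- what changed: Replaces the running prev_substract accumulator with a stateless pairwise formula: each output is computed directly from consecutive element pairs via zip(ints, ints[1:]), using the closed form prev_substract = prev**2 - prev.
import Mathlib
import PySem

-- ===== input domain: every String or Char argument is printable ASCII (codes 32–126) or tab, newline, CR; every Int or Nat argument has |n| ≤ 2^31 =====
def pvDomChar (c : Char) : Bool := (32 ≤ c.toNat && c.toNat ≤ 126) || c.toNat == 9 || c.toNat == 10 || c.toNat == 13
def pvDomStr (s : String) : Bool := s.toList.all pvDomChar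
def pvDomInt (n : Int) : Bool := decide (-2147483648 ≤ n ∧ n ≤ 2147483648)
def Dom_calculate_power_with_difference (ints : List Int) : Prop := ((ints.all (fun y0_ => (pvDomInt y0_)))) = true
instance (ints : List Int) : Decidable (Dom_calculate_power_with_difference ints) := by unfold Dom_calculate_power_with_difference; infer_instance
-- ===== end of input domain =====

-- B computes each output directly from consecutive element pairs (stateless pairwise
-- formula) instead of threading A's running prev_substract accumulator; same cost.
-- ===== PORT A =====
-- A's loop over ints with state (results_list, prev_substract), as structural recursion
def pvLoopA (ints : List Int) (results_list : List Int) (prev_substract : Int) : List Int :=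
  match ints with
  | [] => results_list
  | current_int :: rest =>
      let current_power := current_int ^ 2
      pvLoopA rest (results_list ++ [current_power - prev_substract]) (current_power - current_int)

def calculate_power_with_difference (ints : List Int) : List Int :=
  pvLoopA ints [] 0

-- ===== PORT B =====
def calculate_power_with_difference_alt (ints : List Int) : List Int :=
  match ints with
  | [] => []
  | x :: _ =>
      x ^ 2 :: List.zipWith (fun p c => c * c - p * p + p) ints ints.tail

-- ===== PRECONDITION & SPEC =====
def Spec_calculate_power_with_difference (ints : List Int) (out : List Int) : Prop := out = calculate_power_with_difference_alt ints
instance (ints : List Int) (out : List Int) : Decidable (Spec_calculate_power_with_difference ints out) := by unfold Spec_calculate_power_with_difference; infer_instance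

-- ===== CLAIM (what is proved, stated in full; the proofs are below) =====
def Claim_equal_calculate_power_with_difference : Prop := ∀ (ints : List Int), Dom_calculate_power_with_difference ints → Spec_calculate_power_with_difference ints (calculate_power_with_difference ints)

-- ===== LEMMAS AND PROOFS =====

-- characterisation of A's loop body from a given prev value (proof-only helper)
def pvBody (ints : List Int) (prev : Int) : List Int :=
  match ints with
  | [] => []
  | x :: rest => (x ^ 2 - prev) :: pvBody rest (x ^ 2 - x)

theorem pvLoopA_eq (ints : List Int) : ∀ acc prev,
    pvLoopA ints acc prev = acc ++ pvBody ints prev := by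
  induction ints with
  | nil => intro acc prev; simp [pvLoopA, pvBody]
  | cons x rest ih =>
      intro acc prev
      simp [pvLoopA, pvBody, ih]

theorem pvBody_zip (rest : List Int) : ∀ p : Int,
    pvBody rest (p ^ 2 - p) = List.zipWith (fun p c => c * c - p * p + p) (p :: rest) rest := by
  induction rest with
  | nil => intro p; simp [pvBody]
  | cons c r ih =>
      intro p
      simp [pvBody, List.zipWith, ih c]
      ring

-- ===== VERDICT (by name: the statement is the Claim_ definition above) =====
theorem calculate_power_with_difference_spec : Claim_equal_calculate_power_with_difference := by
  intro ints _
  unfold Spec_calculate_power_with_difference calculate_power_with_difference calculate_power_with_difference_alt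
  cases ints with
  | nil => simp [pvLoopA]
  | cons x rest =>
      rw [pvLoopA_eq]
      simp [pvBody]
      rw [show x ^ 2 - x = x ^ 2 - x from rfl, pvBody_zip rest x]
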